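-- pv_equiv track=rewrite | github.com/asmundg/adventofcode | 2015/src/day_25.py | part1
-- ===== SOURCE A (Python) =====
-- def part1(target_x: int, target_y: int) -> int:
--     coord = (1, 1)
--     val = 20151125
--
--     while coord != (target_x, target_y):
--         val = val * 252533 % 33554393
--         if coord[1] == 1:
--             coord = (1, coord[0] + 1)
--         else:
--             coord = (coord[0] + 1, coord[1] - 1)
--
--     return val
-- ===== SOURCE B (Python) =====
-- def part1(target_x: int, target_y: int) -> int:
--     d = target_x + target_y - 2
--     n = d * (d + 1) // 2 + target_x - 1
--     return 20151125 * pow(252533, n, 33554393) % 33554393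
-- ===== Notes on version B (the rewrite author's own statement) =====
-- stated objective: faster
-- what changed: Replaces the step-by-step diagonal walk with a closed-form count of steps (triangular number) followed by modular exponentiation via pow(b, n, m).
import Mathlib
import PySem

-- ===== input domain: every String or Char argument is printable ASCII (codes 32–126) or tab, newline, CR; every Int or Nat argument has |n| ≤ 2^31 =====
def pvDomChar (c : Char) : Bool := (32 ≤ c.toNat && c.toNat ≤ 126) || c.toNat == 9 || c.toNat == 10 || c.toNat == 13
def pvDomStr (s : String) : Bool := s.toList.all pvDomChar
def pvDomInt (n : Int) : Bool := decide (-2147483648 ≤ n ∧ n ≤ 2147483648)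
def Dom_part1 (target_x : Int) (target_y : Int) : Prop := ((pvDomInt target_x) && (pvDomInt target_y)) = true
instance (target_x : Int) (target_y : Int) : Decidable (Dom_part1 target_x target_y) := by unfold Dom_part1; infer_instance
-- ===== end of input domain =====

-- B replaces A's step-by-step diagonal walk by a closed-form step count plus modular
-- exponentiation (objective: faster, asymptotically).


-- ===== PORT A =====
-- the loop body's coordinate update
def part1Step (c : Int × Int) : Int × Int :=
  if c.2 = 1 then (1, c.1 + 1) else (c.1 + 1, c.2 - 1)

-- A's while-loop; fuel only makes it total (Pre_part1 guarantees enough fuel)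
def part1Loop (target : Int × Int) : Int × Int → Int → Nat → Int
  | _, val, 0 => val
  | c, val, fuel + 1 =>
    if c = target then val
    else part1Loop target (part1Step c) (PySem.Int.mod (val * 252533) 33554393) fuel

def part1 (target_x : Int) (target_y : Int) : Int :=
  part1Loop (target_x, target_y) (1, 1) 20151125 (((target_x + target_y).toNat + 2) ^ 2)

-- ===== PORT B =====
def part1_alt (target_x : Int) (target_y : Int) : Int :=
  let d := target_x + target_y - 2
  let n := PySem.Int.floordiv (d * (d + 1)) 2 + target_x - 1
  PySem.Int.mod (20151125 * PySem.Int.powMod 252533 n.toNat 33554393) 33554393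

-- ===== PRECONDITION & SPEC =====
-- A's while loop never terminates unless 1 ≤ target_x and 1 ≤ target_y (it only visits
-- coordinates with both components ≥ 1), so exactly those inputs are admitted.
def Pre_part1 (target_x : Int) (target_y : Int) : Prop := 1 ≤ target_x ∧ 1 ≤ target_y
instance (target_x : Int) (target_y : Int) : Decidable (Pre_part1 target_x target_y) := by
  unfold Pre_part1; infer_instance

def pvWitness_part1 : Int × Int := (3, 4)

def Spec_part1 (target_x : Int) (target_y : Int) (out : Int) : Prop := out = part1_alt target_x target_y
instance (target_x : Int) (target_y : Int) (out : Int) : Decidable (Spec_part1 target_x target_y out) := by unfold Spec_part1; infer_instance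

-- ===== CLAIM (what is proved, stated in full; the proofs are below) =====
def Claim_equal_part1 : Prop := ∀ (target_x : Int) (target_y : Int), Dom_part1 target_x target_y → Pre_part1 target_x target_y → Spec_part1 target_x target_y (part1 target_x target_y)

-- ===== LEMMAS AND PROOFS =====

-- index of a coordinate in A's visiting order
def pvIdx (c : Int × Int) : Int :=
  (c.1 + c.2 - 2) * (c.1 + c.2 - 1) / 2 + c.1 - 1

def pvValid (c : Int × Int) : Prop := 1 ≤ c.1 ∧ 1 ≤ c.2

def pvVStep (v : Int) : Int := PySem.Int.mod (v * 252533) 33554393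

lemma pvVStep_eq (v : Int) : pvVStep v = v * 252533 % 33554393 :=
  PySem.Int.mod_eq_emod_of_pos (by norm_num)

lemma pvStep_valid {c : Int × Int} (h : pvValid c) : pvValid (part1Step c) := by
  obtain ⟨h1, h2⟩ := h
  unfold part1Step pvValid
  split <;> constructor <;> omega

lemma pvIdx_nonneg {c : Int × Int} (h : pvValid c) : 0 ≤ pvIdx c := by
  obtain ⟨h1, h2⟩ := h
  unfold pvIdx
  have hd : (0:Int) ≤ (c.1 + c.2 - 2) * (c.1 + c.2 - 1) := by nlinarith
  have := Int.ediv_nonneg hd (by norm_num : (0:Int) ≤ 2)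
  omega

lemma pvIdx_step {c : Int × Int} (h : pvValid c) :
    pvIdx (part1Step c) = pvIdx c + 1 := by
  obtain ⟨h1, h2⟩ := h
  unfold part1Step pvIdx
  split
  · rename_i he
    simp only [he]
    have key : (c.1 + 1 - 2) * (c.1 + 1 - 1) + c.1 * 2 = (1 + (c.1 + 1) - 2) * (1 + (c.1 + 1) - 1) := by ring
    have := Int.add_mul_ediv_right ((c.1 + 1 - 2) * (c.1 + 1 - 1)) c.1 (by norm_num : (2:Int) ≠ 0)
    rw [← key, this]
    ring
  · have he : c.1 + 1 + (c.2 - 1) = c.1 + c.2 := by ring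
    simp only
    rw [he]
    ring

lemma pvIter_valid {c : Int × Int} (h : pvValid c) (n : Nat) : pvValid (part1Step^[n] c) := by
  induction n with
  | zero => simpa using h
  | succ k ih => rw [Function.iterate_succ_apply']; exact pvStep_valid ih

lemma pvIter_idx {c : Int × Int} (h : pvValid c) (n : Nat) :
    pvIdx (part1Step^[n] c) = pvIdx c + n := by
  induction n with
  | zero => simp
  | succ k ih =>
    rw [Function.iterate_succ_apply', pvIdx_step (pvIter_valid h k), ih]
    push_cast; ring

lemma pvLoop_run : ∀ (n : Nat) (c : Int × Int) (v : Int) (fuel : Nat), pvValid c → n < fuel →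
    part1Loop (part1Step^[n] c) c v fuel = pvVStep^[n] v := by
  intro n
  induction n with
  | zero =>
    intro c v fuel _ hf
    obtain ⟨k, rfl⟩ : ∃ k, fuel = k + 1 := ⟨fuel - 1, by omega⟩
    simp [part1Loop]
  | succ m ih =>
    intro c v fuel hc hf
    obtain ⟨k, rfl⟩ : ∃ k, fuel = k + 1 := ⟨fuel - 1, by omega⟩
    have hne : c ≠ part1Step^[m + 1] c := by
      intro he
      have := pvIter_idx hc (m + 1)
      rw [← he] at this
      omega
    rw [part1Loop, if_neg hne, Function.iterate_succ_apply, Function.iterate_succ_apply]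
    exact ih (part1Step c) (pvVStep v) k (pvStep_valid hc) (by omega)

lemma pvReach : ∀ (n : Nat) (t : Int × Int), pvValid t → pvIdx t = n →
    part1Step^[n] (1, 1) = t := by
  intro n
  induction n with
  | zero =>
    intro t ht hidx
    obtain ⟨h1, h2⟩ := ht
    have hd : (0:Int) ≤ (t.1 + t.2 - 2) * (t.1 + t.2 - 1) := by nlinarith
    have hdiv : 0 ≤ (t.1 + t.2 - 2) * (t.1 + t.2 - 1) / 2 := Int.ediv_nonneg hd (by norm_num)
    have hx : t.1 = 1 := by unfold pvIdx at hidx; omega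
    have hy : t.2 = 1 := by
      by_contra hne
      have h2' : 2 ≤ t.2 := by omega
      have hge : (2:Int) ≤ (t.1 + t.2 - 2) * (t.1 + t.2 - 1) := by nlinarith
      have : 1 ≤ (t.1 + t.2 - 2) * (t.1 + t.2 - 1) / 2 := by
        rw [Int.le_ediv_iff_mul_le (by norm_num : (0:Int) < 2)]; omega
      unfold pvIdx at hidx; omega
    simp [Function.iterate_zero, Prod.ext_iff, hx, hy]
  | succ m ih =>
    intro t ht hidx
    obtain ⟨h1, h2⟩ := ht
    -- the predecessor of t in A's visiting order
    set p : Int × Int := if t.1 = 1 then (t.2 - 1, 1) else (t.1 - 1, t.2 + 1) with hp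
    have hpvalid : pvValid p := by
      rw [hp]; unfold pvValid
      split
      · rename_i h1'
        constructor
        · -- t ≠ (1,1) since pvIdx t = m+1 > 0 = pvIdx (1,1)
          by_contra hlt
          have ht2 : t.2 = 1 := by omega
          have : pvIdx t = 0 := by unfold pvIdx; rw [h1', ht2]; norm_num
          omega
        · omega
      · constructor <;> omega
    have hstep : part1Step p = t := by
      by_cases h1' : t.1 = 1
      · simp [hp, h1', part1Step, Prod.ext_iff]
      · have hne2 : t.2 + 1 ≠ 1 := by omega
        simp [hp, h1', part1Step, hne2]
    have hpidx : pvIdx p = m := by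
      have := pvIdx_step hpvalid
      rw [hstep] at this
      omega
    rw [Function.iterate_succ_apply', ih p hpvalid hpidx, hstep]

lemma pvVal_closed : ∀ n : Nat, pvVStep^[n] (20151125 : Int) = 20151125 * 252533 ^ n % 33554393 := by
  intro n
  induction n with
  | zero => norm_num
  | succ k ih =>
    rw [Function.iterate_succ_apply', ih, pvVStep_eq, pow_succ, ← mul_assoc]
    conv_lhs => rw [Int.mul_emod]
    conv_rhs => rw [Int.mul_emod]
    rw [Int.emod_emod_of_dvd _ (dvd_refl _)]

-- ===== VERDICT (by name: the statement is the Claim_ definition above) =====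
theorem part1_spec : Claim_equal_part1 := by
  intro x y _ hpre
  obtain ⟨hx, hy⟩ := hpre
  unfold Spec_part1 part1 part1_alt
  have hvalid : pvValid (x, y) := ⟨hx, hy⟩
  set N : Nat := (pvIdx (x, y)).toNat with hN
  have hNidx : (N : Int) = pvIdx (x, y) := Int.toNat_of_nonneg (pvIdx_nonneg hvalid)
  -- the fuel suffices
  have hs : (0:Int) ≤ x + y := by omega
  have hcast : (((x + y).toNat + 2 : Nat) : Int) = x + y + 2 := by
    push_cast [Int.toNat_of_nonneg hs]; ring
  have hfuel : N < ((x + y).toNat + 2) ^ 2 := by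
    have hb : pvIdx (x, y) < (x + y + 2) ^ 2 := by
      unfold pvIdx
      have hd : (0:Int) ≤ (x + y - 2) * (x + y - 1) := by nlinarith
      have h1 : (x + y - 2) * (x + y - 1) / 2 ≤ (x + y - 2) * (x + y - 1) :=
        Int.ediv_le_self _ hd
      nlinarith
    have : ((N : Int)) < ((((x + y).toNat + 2 : Nat)) : Int) ^ 2 := by
      rw [hNidx, hcast]; exact hb
    exact_mod_cast this
  have hreach : part1Step^[N] (1, 1) = (x, y) := pvReach N (x, y) hvalid hNidx.symm
  rw [← hreach, pvLoop_run N (1, 1) 20151125 _ ⟨le_refl 1, le_refl 1⟩ hfuel, pvVal_closed]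
  -- now the B side
  show _ = PySem.Int.mod
      (20151125 * PySem.Int.powMod 252533
        (PySem.Int.floordiv ((x + y - 2) * ((x + y - 2) + 1)) 2 + x - 1).toNat 33554393) 33554393
  have hfd : PySem.Int.floordiv ((x + y - 2) * ((x + y - 2) + 1)) 2 = (x + y - 2) * (x + y - 1) / 2 := by
    rw [PySem.Int.floordiv_eq_ediv_of_pos (by norm_num)]
    ring_nf
  have hn : (PySem.Int.floordiv ((x + y - 2) * ((x + y - 2) + 1)) 2 + x - 1).toNat = N := by
    rw [hfd, hN]
    congr 1
  rw [hn, PySem.Int.powMod_eq_emod _ _ (by norm_num : (0:Int) < 33554393),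
      PySem.Int.mod_eq_emod_of_pos (by norm_num : (0:Int) < 33554393)]
  conv_lhs => rw [Int.mul_emod]
  conv_rhs => rw [Int.mul_emod]
  rw [Int.emod_emod_of_dvd _ (dvd_refl _)]
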